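-- pv_equiv track=rewrite | github.com/NhanDoV/Lectures_notes-teaching-in-VN- | My owner_classes/all_of_my_classes.py | from_hex
-- ===== SOURCE A (Python) =====
-- def from_hex(form: str, num: str) -> str:
--     """
--         Convert a hexadecimal number into another number system.
--
--         Supported forms:
--             - "dec" : decimal
--             - "bin" : binary
--             - "oct" : octal
--
--         Examples:
--             hex "1F"   -> dec "31"
--             hex "A3"   -> bin "10100011"
--             hex "FF"   -> oct "377"
--
--         Args:
--             form (str): Target number system ("dec", "bin", "oct").
--             num (str): Hexadecimal string using digits 0–9 and A–F.
--
--         Returns: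
--             str: Converted number as a string.
--
--         Raises:
--             ValueError: If form is invalid or input contains invalid hex characters.
--     """
--     base_dict = {"dec": 10, "bin": 2, "oct": 8}
--
--     if form not in base_dict:
--         raise ValueError("Form must be one of: 'dec', 'bin', 'oct'.")
--
--     # Validate hex input
--     num = num.upper()
--     if any(ch not in "0123456789ABCDEF" for ch in num):
--         raise ValueError("Input must be a valid hexadecimal string.")
--
--     # Step 1: hex → decimal
--     dec_val = 0
--     for ch in num:
--         dec_val = dec_val * 16 + int(ch, 16)
--
--     if form == "dec":
--         return str(dec_val)
--
--     # Step 2: decimal → target (bin or oct)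
--     digits = "0123456789ABCDEF"
--     base = base_dict[form]
--
--     result = []
--     temp = dec_val
--
--     if temp == 0:
--         return "0"
--
--     while temp > 0:
--         result.append(digits[temp % base])
--         temp //= base
--
--     return ''.join(reversed(result))
-- ===== SOURCE B (Python) =====
-- def from_hex(form: str, num: str) -> str:
--     base_dict = {"dec": 10, "bin": 2, "oct": 8}
--
--     if form not in base_dict:
--         raise ValueError("Form must be one of: 'dec', 'bin', 'oct'.")
--
--     num = num.upper()
--     if any(ch not in "0123456789ABCDEF" for ch in num):
--         raise ValueError("Input must be a valid hexadecimal string.")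
--
--     val = int(num or '0', 16)
--
--     if form == "dec":
--         return str(val)
--     if form == "bin":
--         return format(val, 'b')
--     return format(val, 'o')
-- ===== Notes on version B (the rewrite author's own statement) =====
-- stated objective: idiomatic
-- what changed: Keeps A's validation but replaces the manual Horner parse loop with int(num or '0', 16) and the repeated-division/reversed-accumulator output loop with str()/format(val,'b')/format(val,'o') library conversions.
import Mathlib
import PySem

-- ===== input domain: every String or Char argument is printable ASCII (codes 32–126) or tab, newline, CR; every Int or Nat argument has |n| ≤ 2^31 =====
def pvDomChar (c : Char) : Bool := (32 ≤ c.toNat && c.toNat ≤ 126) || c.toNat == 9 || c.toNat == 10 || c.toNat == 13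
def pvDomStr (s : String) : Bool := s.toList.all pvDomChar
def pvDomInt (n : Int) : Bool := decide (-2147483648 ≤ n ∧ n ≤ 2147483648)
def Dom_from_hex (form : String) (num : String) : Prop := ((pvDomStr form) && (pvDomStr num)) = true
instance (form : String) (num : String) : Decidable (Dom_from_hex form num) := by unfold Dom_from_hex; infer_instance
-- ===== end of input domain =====

-- B replaces A's Horner parse loop and repeated-division digit loop with library-style
-- conversions (int(s,16) / format(v,'b'|'o')); same validation and messages (idiomatic, not faster).

-- ===== PORT A =====

-- int(ch, 16) for a single character; only reached on validated chars '0'-'9','A'-'F'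
def hexDigitVal (c : Char) : Int :=
  if 48 ≤ c.toNat ∧ c.toNat ≤ 57 then (c.toNat : Int) - 48
  else if 65 ≤ c.toNat ∧ c.toNat ≤ 70 then (c.toNat : Int) - 55
  else 0  -- int(ch,16) raises here; unreachable behind the validation guard

-- the while-loop: result.append(digits[temp % base]); temp //= base.
-- fuel bounds the iteration count (≤ initial temp.toNat since base ≥ 2); it only makes the loop total.
def fromHexLoop : Nat → Int → Int → List Char → List Char
  | 0, _, _, res => res
  | f+1, base, temp, res =>
    if temp > 0 then
      fromHexLoop f base (PySem.Int.floordiv temp base)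
        (res ++ [(PySem.List.pyGet? "0123456789ABCDEF".toList (PySem.Int.mod temp base)).getD ' '])
    else res

def from_hex (form : String) (num : String) : String :=
  if !(form == "dec" || form == "bin" || form == "oct") then ""  -- raise ValueError (excluded by Pre_)
  else
    let numU := PySem.Str.upper num
    if numU.toList.any (fun ch => !("0123456789ABCDEF".toList.contains ch)) then ""  -- raise ValueError (excluded by Pre_)
    else
      let decVal := numU.toList.foldl (fun a ch => a * 16 + hexDigitVal ch) 0
      if form == "dec" then PySem.Int.toStr decVal
      else
        let base : Int := if form == "bin" then 2 else 8  -- base_dict[form]; form is "bin" or "oct" here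
        if decVal == 0 then "0"
        else String.ofList ((fromHexLoop decVal.toNat base decVal []).reverse)

-- ===== PORT B =====

-- port of int(s, 16) on an already-validated uppercase hex string; int('0',16) = 0 = fold of []
def hexParse (cs : List Char) : Int := cs.foldl (fun a ch => a * 16 + hexDigitVal ch) 0

-- port of format(n, 'b') / format(n, 'o') for n ≥ 0 (PySem covers only the 'b' case):
-- most-significant digit first; fuel only makes it total (n ≥ 1 iterations never exceed n)
def fmtGo : Nat → Nat → Nat → List Char
  | _, 0, _ => []
  | base, f+1, n =>
    if n < base then [Char.ofNat (48 + n)]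
    else fmtGo base f (n / base) ++ [Char.ofNat (48 + n % base)]

def fmtBase (base : Nat) (n : Nat) : String :=
  if n = 0 then "0" else String.ofList (fmtGo base n n)

def from_hex_alt (form : String) (num : String) : String :=
  if !(form == "dec" || form == "bin" || form == "oct") then ""  -- raise ValueError (excluded by Pre_)
  else
    let numU := PySem.Str.upper num
    if numU.toList.any (fun ch => !("0123456789ABCDEF".toList.contains ch)) then ""  -- raise ValueError (excluded by Pre_)
    else
      let val := hexParse numU.toList
      if form == "dec" then PySem.Int.toStr val
      else if form == "bin" then fmtBase 2 val.toNat
      else fmtBase 8 val.toNat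

-- ===== PRECONDITION & SPEC =====
-- Pre_ excludes exactly the inputs on which A raises ValueError: an unknown form,
-- or a character of the uppercased input outside 0-9A-F.
def Pre_from_hex (form : String) (num : String) : Prop :=
  (form = "dec" ∨ form = "bin" ∨ form = "oct") ∧
  ((PySem.Str.upper num).toList.all (fun c => "0123456789ABCDEF".toList.contains c)) = true
instance (form : String) (num : String) : Decidable (Pre_from_hex form num) := by
  unfold Pre_from_hex; infer_instance

def pvWitness_from_hex : String × String := ("bin", "1F")

def Spec_from_hex (form : String) (num : String) (out : String) : Prop := out = from_hex_alt form num
instance (form : String) (num : String) (out : String) : Decidable (Spec_from_hex form num out) := by unfold Spec_from_hex; infer_instance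

-- ===== CLAIM (what is proved, stated in full; the proofs are below) =====
def Claim_equal_from_hex : Prop := ∀ (form : String) (num : String), Dom_from_hex form num → Pre_from_hex form num → Spec_from_hex form num (from_hex form num)

-- ===== LEMMAS AND PROOFS =====

theorem hexDigitVal_nonneg (c : Char) : 0 ≤ hexDigitVal c := by
  unfold hexDigitVal; split_ifs with h1 h2 <;> [omega; omega; exact le_refl 0]

theorem hexParse_nonneg (cs : List Char) : 0 ≤ hexParse cs := by
  unfold hexParse
  suffices h : ∀ a : Int, 0 ≤ a → 0 ≤ cs.foldl (fun a ch => a * 16 + hexDigitVal ch) a by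
    exact h 0 le_rfl
  induction cs with
  | nil => intro a ha; simpa using ha
  | cons c cs ih =>
    intro a ha
    simp only [List.foldl_cons]
    exact ih _ (by have := hexDigitVal_nonneg c; nlinarith)

theorem fromHexLoop_append (f : Nat) (b t : Int) (res : List Char) :
    fromHexLoop f b t res = res ++ fromHexLoop f b t [] := by
  induction f generalizing t res with
  | zero => simp [fromHexLoop]
  | succ f ih =>
    simp only [fromHexLoop]
    split
    · rw [ih]; conv_rhs => rw [ih]
      simp
    · simp

theorem digit_char (bn k : Nat) (hb : bn = 2 ∨ bn = 8) (hk : k < bn) :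
    (PySem.List.pyGet? "0123456789ABCDEF".toList ((k : Nat) : Int)).getD ' ' = Char.ofNat (48 + k) := by
  rcases hb with hb | hb <;> subst hb <;> interval_cases k <;> decide

theorem loop_eq_fmtGo (bn : Nat) (hb : bn = 2 ∨ bn = 8) :
    ∀ m, 1 ≤ m → ∀ f1 f2, m ≤ f1 → m ≤ f2 →
      (fromHexLoop f1 (bn : Int) (m : Int) []).reverse = fmtGo bn f2 m := by
  intro m
  induction m using Nat.strong_induction_on with
  | _ m ih =>
    intro hm f1 f2 hf1 hf2
    have hbn2 : 2 ≤ bn := by rcases hb with h | h <;> omega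
    obtain ⟨f1', rfl⟩ : ∃ f1', f1 = f1' + 1 := ⟨f1 - 1, by omega⟩
    obtain ⟨f2', rfl⟩ : ∃ f2', f2 = f2' + 1 := ⟨f2 - 1, by omega⟩
    have hpos : ((m : Int) > 0) := by exact_mod_cast hm
    simp only [fromHexLoop, if_pos hpos]
    rw [fromHexLoop_append]
    rw [PySem.Int.floordiv_natCast, PySem.Int.mod_natCast]
    rw [digit_char bn (m % bn) hb (Nat.mod_lt _ (by omega))]
    by_cases hlt : m < bn
    · have hdiv : m / bn = 0 := Nat.div_eq_of_lt hlt
      have hmod : m % bn = m := Nat.mod_eq_of_lt hlt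
      rw [hdiv, hmod]
      have hz : ∀ f, fromHexLoop f (bn : Int) ((0 : Nat) : Int) [] = [] := by
        intro f; cases f <;> simp [fromHexLoop]
      rw [hz]
      simp [fmtGo, hlt]
    · have hge : bn ≤ m := by omega
      have hq1 : 1 ≤ m / bn := (Nat.one_le_div_iff (by omega)).mpr hge
      have hqlt : m / bn < m := Nat.div_lt_self (by omega) (by omega)
      have hrec := ih (m / bn) hqlt hq1 f1' f2' (by omega) (by omega)
      simp only [Int.natCast_div] at hrec
      simp [hrec, fmtGo, hlt]

theorem branch_eq (bn : Nat) (hb : bn = 2 ∨ bn = 8) (v : Int) (hv : 0 ≤ v) :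
    (if v == 0 then "0" else String.ofList ((fromHexLoop v.toNat (bn : Int) v []).reverse)) =
      fmtBase bn v.toNat := by
  by_cases h0 : v = 0
  · subst h0; simp [fmtBase]
  · have hm : 1 ≤ v.toNat := by omega
    have hcast : ((v.toNat : Nat) : Int) = v := Int.toNat_of_nonneg hv
    obtain ⟨m, rfl⟩ : ∃ m : Nat, v = (m : Int) := ⟨v.toNat, hcast.symm⟩
    rw [if_neg (by simpa using h0)]
    simp only [Int.toNat_natCast] at hm ⊢
    rw [fmtBase, if_neg (by omega)]
    rw [loop_eq_fmtGo bn hb m hm m m le_rfl le_rfl]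

-- ===== VERDICT (by name: the statement is the Claim_ definition above) =====
theorem from_hex_spec : Claim_equal_from_hex := by
  intro form num _ _
  unfold Spec_from_hex from_hex from_hex_alt
  simp only [hexParse]
  have hv := hexParse_nonneg (PySem.Str.upper num).toList
  unfold hexParse at hv
  generalize List.foldl (fun a ch => a * 16 + hexDigitVal ch) 0 (PySem.Str.upper num).toList = v at hv ⊢
  split_ifs with h1 h2 h3 h4 h5
  · rfl
  · rfl
  · rfl
  · rw [← branch_eq 2 (Or.inl rfl) _ hv, if_pos h4]
  · rw [← branch_eq 8 (Or.inr rfl) _ hv, if_pos h4]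
  · rw [← branch_eq 2 (Or.inl rfl) _ hv, if_neg h4]; norm_num
  · rw [← branch_eq 8 (Or.inr rfl) _ hv, if_neg h4]; norm_num
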